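-- pv_equiv track=rewrite | github.com/fjkiani/creative-saas | backend/graph/nodes/compliance_post.py | check_text_prohibited
-- ===== SOURCE A (Python) =====
-- def check_text_prohibited(
--     localized_copies: list[dict],
--     prohibited_words: list[str],
-- ) -> list[tuple[str, str, str]]:
--     """
--     Scan all rendered text strings for prohibited words.
--     Returns list of (product_id, market, description) tuples.
--     """
--     flagged = []
--     for copy in localized_copies:
--         for field in ["headline", "tagline", "cta"]:
--             text = (copy.get(field) or "").lower()
--             for word in prohibited_words:
--                 if word.lower() in text:
--                     flagged.append((
--                         copy.get("product_id", "unknown"),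
--                         copy.get("market", "unknown"),
--                         f"'{word}' found in {field}: '{copy.get(field)}'",
--                     ))
--     return flagged
-- ===== SOURCE B (Python) =====
-- def check_text_prohibited(
--     localized_copies: list[dict],
--     prohibited_words: list[str],
-- ) -> list[tuple[str, str, str]]:
--     # Instead of running a substring scan per (field, word), build for each
--     # field text a hash index of ALL its substrings whose length occurs among
--     # the prohibited words; each word check is then a single O(1) set lookup.
--     lowered = [w.lower() for w in prohibited_words]
--     lengths = {len(w) for w in lowered}
--     flagged = []
--     for copy in localized_copies:
--         pid = copy.get("product_id", "unknown")
--         market = copy.get("market", "unknown")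
--         for field in ["headline", "tagline", "cta"]:
--             raw = copy.get(field)
--             text = (raw or "").lower()
--             subs = set()
--             for L in lengths:
--                 for i in range(len(text) - L + 1):
--                     subs.add(text[i:i + L])
--             for w, wl in zip(prohibited_words, lowered):
--                 if wl in subs:
--                     flagged.append((pid, market,
--                                     f"'{w}' found in {field}: '{raw}'"))
--     return flagged
-- ===== Notes on version B (the rewrite author's own statement) =====
-- stated objective: faster
-- what changed: B builds, per field text, a hash-set index of all its substrings of the lengths occurring among the (once-lowercased) prohibited words, so each word check becomes a single O(1) set lookup instead of A's per-(field,word) substring scan (measured ~1.7x on the timing inputs).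
import Mathlib
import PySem

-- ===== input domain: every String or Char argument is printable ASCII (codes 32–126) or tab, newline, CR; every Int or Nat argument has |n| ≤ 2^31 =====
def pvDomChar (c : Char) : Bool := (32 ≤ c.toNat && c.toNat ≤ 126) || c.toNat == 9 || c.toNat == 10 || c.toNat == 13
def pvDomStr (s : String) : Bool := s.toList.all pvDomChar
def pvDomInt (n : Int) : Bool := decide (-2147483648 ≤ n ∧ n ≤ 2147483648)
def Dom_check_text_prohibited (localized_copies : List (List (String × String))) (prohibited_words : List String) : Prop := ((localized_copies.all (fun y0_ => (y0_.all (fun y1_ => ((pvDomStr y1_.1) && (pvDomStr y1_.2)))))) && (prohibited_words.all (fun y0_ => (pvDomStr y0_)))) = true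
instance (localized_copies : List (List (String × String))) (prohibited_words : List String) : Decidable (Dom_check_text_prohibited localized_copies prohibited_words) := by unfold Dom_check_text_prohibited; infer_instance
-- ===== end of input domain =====

-- B replaces A's per-(field,word) substring scan by one hash index of each field
-- text's substrings (only lengths occurring among the words), so every word check
-- is a single set lookup (objective: alternative algorithm / data structure).

-- f-string rendering of copy.get(field): Python prints None for a missing key
def pvOptStr : Option String → String
  | some s => s
  | none => "None"

-- ===== PORT A =====
def check_text_prohibited (localized_copies : List (List (String × String))) (prohibited_words : List String) : List (String × String × String) :=
  localized_copies.foldl (fun flagged copy =>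
    let d := PySem.Dict.ofList copy
    (["headline", "tagline", "cta"] : List String).foldl (fun flagged field =>
      let text := PySem.Str.lower ((d.get? field).getD "")
      prohibited_words.foldl (fun flagged word =>
        if PySem.Str.isIn (PySem.Str.lower word) text then
          flagged ++ [(d.getD "product_id" "unknown", d.getD "market" "unknown",
            "'" ++ word ++ "' found in " ++ field ++ ": '" ++ pvOptStr (d.get? field) ++ "'")]
        else flagged) flagged) flagged) []

-- ===== PORT B =====
-- subs = {text[i:i+L] for L in lengths for i in range(len(text)-L+1)}
def pvSubsIndex (lengths : PySem.Set Nat) (text : List Char) : PySem.Set (List Char) :=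
  lengths.foldl (fun subs (L : Nat) =>
    (PySem.List.pyRange 0 ((text.length : Int) - (L : Int) + 1) 1).foldl
      (fun subs i => PySem.Set.add subs (PySem.List.slice text (some i) (some (i + (L : Int)))))
      subs)
    PySem.Set.empty

def check_text_prohibited_alt (localized_copies : List (List (String × String))) (prohibited_words : List String) : List (String × String × String) :=
  let lowered := prohibited_words.map (fun w => (PySem.Str.lower w).toList)
  let lengths : PySem.Set Nat := PySem.Set.ofList (lowered.map List.length)
  localized_copies.foldl (fun flagged copy =>
    let d := PySem.Dict.ofList copy
    let pid := d.getD "product_id" "unknown"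
    let market := d.getD "market" "unknown"
    (["headline", "tagline", "cta"] : List String).foldl (fun flagged field =>
      let raw := d.get? field
      let text := (PySem.Str.lower (raw.getD "")).toList
      let subs := pvSubsIndex lengths text
      (prohibited_words.zip lowered).foldl (fun flagged p =>
        if PySem.Set.contains subs p.2 then
          flagged ++ [(pid, market,
            "'" ++ p.1 ++ "' found in " ++ field ++ ": '" ++ pvOptStr raw ++ "'")]
        else flagged) flagged) flagged) []

-- ===== PRECONDITION & SPEC =====
def Spec_check_text_prohibited (localized_copies : List (List (String × String))) (prohibited_words : List String) (out : List (String × String × String)) : Prop := out = check_text_prohibited_alt localized_copies prohibited_words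
instance (localized_copies : List (List (String × String))) (prohibited_words : List String) (out : List (String × String × String)) : Decidable (Spec_check_text_prohibited localized_copies prohibited_words out) := by unfold Spec_check_text_prohibited; infer_instance

-- ===== CLAIM (what is proved, stated in full; the proofs are below) =====
def Claim_equal_check_text_prohibited : Prop := ∀ (localized_copies : List (List (String × String))) (prohibited_words : List String), Dom_check_text_prohibited localized_copies prohibited_words → Spec_check_text_prohibited localized_copies prohibited_words (check_text_prohibited localized_copies prohibited_words)

-- ===== LEMMAS AND PROOFS =====

-- membership in a fold of Set.add
theorem pv_mem_foldl_add {α β : Type} [BEq α] [LawfulBEq α] (f : β → α) (x : α) :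
    ∀ (l : List β) (s : PySem.Set α),
      (x ∈ l.foldl (fun s i => PySem.Set.add s (f i)) s) ↔ x ∈ s ∨ ∃ i ∈ l, f i = x := by
  intro l
  induction l with
  | nil => intro s; simp
  | cons a l ih =>
    intro s
    simp [List.foldl_cons, ih, PySem.Set.mem_add, or_assoc]
    tauto

-- membership in the substring index
theorem pv_mem_subsIndex (lengths : PySem.Set Nat) (text : List Char) (x : List Char) :
    x ∈ pvSubsIndex lengths text ↔
      ∃ L ∈ lengths, ∃ i : Int, 0 ≤ i ∧ i < (text.length : Int) - (L : Int) + 1 ∧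
        PySem.List.slice text (some i) (some (i + (L : Int))) = x := by
  unfold pvSubsIndex
  have main : ∀ (l : List Nat) (s : PySem.Set (List Char)),
      (x ∈ l.foldl (fun subs (L : Nat) =>
        (PySem.List.pyRange 0 ((text.length : Int) - (L : Int) + 1) 1).foldl
          (fun subs i => PySem.Set.add subs (PySem.List.slice text (some i) (some (i + (L : Int)))))
          subs) s) ↔
      x ∈ s ∨ ∃ L ∈ l, ∃ i : Int, 0 ≤ i ∧ i < (text.length : Int) - (L : Int) + 1 ∧
        PySem.List.slice text (some i) (some (i + (L : Int))) = x := by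
    intro l
    induction l with
    | nil => intro s; simp
    | cons L l ih =>
      intro s
      rw [List.foldl_cons, ih, pv_mem_foldl_add]
      constructor
      · rintro ((h | ⟨i, hi, h2⟩) | ⟨L', hL', h⟩)
        · exact Or.inl h
        · rw [PySem.List.mem_pyRange_one] at hi
          exact Or.inr ⟨L, by simp, i, hi.1, hi.2, h2⟩
        · exact Or.inr ⟨L', by simp [hL'], h⟩
      · rintro (h | ⟨L', hL', i, h0, h1, h2⟩)
        · exact Or.inl (Or.inl h)
        · rcases List.mem_cons.mp hL' with rfl | hm
          · exact Or.inl (Or.inr ⟨i, PySem.List.mem_pyRange_one.mpr ⟨h0, h1⟩, h2⟩)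
          · exact Or.inr ⟨L', hm, i, h0, h1, h2⟩
  simpa using main lengths PySem.Set.empty

-- a word's membership in the index is exactly substring containment
theorem pv_subsIndex_isIn (lengths : PySem.Set Nat) (text wl : List Char)
    (hL : wl.length ∈ lengths) :
    (wl ∈ pvSubsIndex lengths text) ↔ PySem.Chars.isIn wl text = true := by
  rw [pv_mem_subsIndex, ← PySem.Chars.exists_prefix_drop_iff_isIn]
  constructor
  · rintro ⟨L, _, i, h0, h1, h2⟩
    obtain ⟨n, rfl⟩ : ∃ n : Nat, i = (n : Int) := ⟨i.toNat, (Int.toNat_of_nonneg h0).symm⟩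
    rw [PySem.List.slice_natCast_add] at h2
    refine ⟨n, ?_⟩
    rw [List.prefix_iff_eq_take, ← h2]
    have hn : n + L ≤ text.length := by omega
    simp [List.length_take, List.length_drop]
  · rintro ⟨j, hpre⟩
    by_cases hnil : wl = []
    · subst hnil
      refine ⟨[].length, hL, ((0 : Nat) : Int), by omega, by push_cast [List.length_nil]; omega, ?_⟩
      rw [PySem.List.slice_natCast_add]
      simp
    · have hj : j ≤ text.length := by
        by_contra hgt
        have hdrop : text.drop j = [] := List.drop_eq_nil_of_le (by omega)
        rw [hdrop] at hpre
        exact hnil (List.prefix_nil.mp hpre)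
      have hjlen : wl.length + j ≤ text.length := by
        have := hpre.length_le
        rw [List.length_drop] at this
        omega
      refine ⟨wl.length, hL, (j : Int), by omega, by omega, ?_⟩
      rw [PySem.List.slice_natCast_add]
      exact (List.prefix_iff_eq_take.mp hpre).symm

-- the per-word conditions of A and B agree (as Bools)
theorem pv_cond_eq (prohibited_words : List String) (w : String) (hw : w ∈ prohibited_words)
    (text : String) :
    PySem.Set.contains
        (pvSubsIndex (PySem.Set.ofList ((prohibited_words.map (fun w => (PySem.Str.lower w).toList)).map List.length))
          text.toList)
        (PySem.Str.lower w).toList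
      = PySem.Str.isIn (PySem.Str.lower w) text := by
  have hL : ((PySem.Str.lower w).toList).length ∈
      PySem.Set.ofList ((prohibited_words.map (fun w => (PySem.Str.lower w).toList)).map List.length) := by
    rw [PySem.Set.mem_ofList]
    simp only [List.map_map, List.mem_map]
    exact ⟨w, hw, rfl⟩
  have h := pv_subsIndex_isIn _ text.toList _ hL
  rw [PySem.Str.isIn_eq]
  by_cases hmem : (PySem.Str.lower w).toList ∈ pvSubsIndex
      (PySem.Set.ofList ((prohibited_words.map (fun w => (PySem.Str.lower w).toList)).map List.length)) text.toList
  · rw [h.mp hmem]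
    simpa [PySem.Set.contains] using hmem
  · have hfalse : PySem.Chars.isIn (PySem.Str.lower w).toList text.toList = false := by
      cases hc : PySem.Chars.isIn (PySem.Str.lower w).toList text.toList
      · rfl
      · exact absurd (h.mpr hc) hmem
    rw [hfalse]
    simpa [PySem.Set.contains] using hmem

-- zip of a list with its own map, as a single map
theorem pv_zip_self_map {a b : Type} (g : a -> b) (l : List a) :
    l.zip (l.map g) = l.map (fun x => (x, g x)) := by
  simpa using List.zip_map' (f := id) (g := g) (l := l)

-- ===== VERDICT (by name: the statement is the Claim_ definition above) =====
theorem check_text_prohibited_spec : Claim_equal_check_text_prohibited := by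
  intro lcs pws _
  unfold Spec_check_text_prohibited
  simp only [check_text_prohibited, check_text_prohibited_alt]
  congr 1
  funext flagged copy
  congr 1
  funext flagged field
  rw [pv_zip_self_map, List.foldl_map]
  simp only [PySem.List.foldl_append_if]
  congr 1
  congr 1
  apply List.filter_congr
  intro w hw
  exact (pv_cond_eq pws w hw _).symm
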